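-- pv_equiv track=rewrite | github.com/renash2me/word-games | layout_generator.py | count_slots
-- ===== SOURCE A (Python) =====
-- def count_slots(grid, min_len, max_len):
--     rows = len(grid); cols = len(grid[0])
--     count = 0
--     by_len = {}
--     for r in range(rows):
--         c = 0
--         while c < cols:
--             if grid[r][c] == '#':
--                 c += 1; continue
--             start = c
--             while c < cols and grid[r][c] == '.':
--                 c += 1
--             l = c - start
--             if min_len <= l <= max_len:
--                 count += 1
--                 by_len[l] = by_len.get(l, 0) + 1
--     for c in range(cols):
--         r = 0
--         while r < rows:
--             if grid[r][c] == '#':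
--                 r += 1; continue
--             start = r
--             while r < rows and grid[r][c] == '.':
--                 r += 1
--             l = r - start
--             if min_len <= l <= max_len:
--                 count += 1
--                 by_len[l] = by_len.get(l, 0) + 1
--     return count, by_len
-- ===== SOURCE B (Python) =====
-- def count_slots(grid, min_len, max_len):
--     cols = len(grid[0])
--     lines = [row[:cols] for row in grid]
--     lines += [''.join(row[c] for row in grid) for c in range(cols)]
--     count = 0
--     by_len = {}
--     for line in lines:
--         for seg in line.split('#'):
--             l = len(seg)
--             if l and min_len <= l <= max_len:
--                 count += 1
--                 by_len[l] = by_len.get(l, 0) + 1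
--     return count, by_len
-- ===== Notes on version B (the rewrite author's own statement) =====
-- stated objective: idiomatic
-- what changed: Replaces the four hand-rolled index-chasing while-loops (manual run scanning per row and per column) by a uniform pass: build the row strings and column strings once, split each on '#', and tally the non-empty segment lengths.
import Mathlib
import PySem

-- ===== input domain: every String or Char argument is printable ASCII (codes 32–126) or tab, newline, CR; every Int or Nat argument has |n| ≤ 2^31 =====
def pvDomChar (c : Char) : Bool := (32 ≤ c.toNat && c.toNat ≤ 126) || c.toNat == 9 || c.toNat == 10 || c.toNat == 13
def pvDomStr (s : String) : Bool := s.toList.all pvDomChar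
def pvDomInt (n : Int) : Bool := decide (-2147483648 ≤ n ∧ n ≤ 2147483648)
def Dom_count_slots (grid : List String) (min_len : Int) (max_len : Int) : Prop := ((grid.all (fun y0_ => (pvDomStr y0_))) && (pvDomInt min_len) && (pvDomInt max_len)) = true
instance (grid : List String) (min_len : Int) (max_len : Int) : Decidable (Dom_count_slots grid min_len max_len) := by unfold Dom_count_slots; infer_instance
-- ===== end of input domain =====

-- B replaces A's four index-chasing while-loops by one uniform pass: build row/column
-- strings once, split each on '#', tally non-empty segment lengths (objective: idiomatic).

-- ===== PORT A =====
-- inner `while c < cols and grid[r][c] == '.': c += 1`, scanning the remaining suffix: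
-- returns (number of '.' consumed, remaining suffix)
def aScan : List Char → Nat × List Char
  | [] => (0, [])
  | c :: t => if c = '.' then ((aScan t).1 + 1, (aScan t).2) else (0, c :: t)

-- outer `while c < cols: ...` of A, scanning the remaining suffix of the line; `fuel`
-- bounds the iterations (Python diverges on a cell that is neither '.' nor '#'; Pre_ excludes that)
def aLine (min_len max_len : Int) : Nat → List Char → Int × PySem.Dict Int Int → Int × PySem.Dict Int Int
  | 0, _, st => st
  | _ + 1, [], st => st
  | fuel + 1, c :: rest, st =>
    if c = '#' then aLine min_len max_len fuel rest st
    else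
      let p := aScan (c :: rest)
      let l : Int := (p.1 : Int)
      if min_len ≤ l ∧ l ≤ max_len then
        aLine min_len max_len fuel p.2 (st.1 + 1, st.2.insert l (st.2.getD l 0 + 1))
      else aLine min_len max_len fuel p.2 st

def count_slots (grid : List String) (min_len : Int) (max_len : Int) : Int × (List (Int × Int)) :=
  let g := grid.map String.toList
  let rows := g.length
  let cols := (g.headD []).length          -- len(grid[0]); grid = [] raises in Python (excluded by Pre_)
  let st1 := (List.range rows).foldl
    (fun st r => aLine min_len max_len cols ((g.getD r []).take cols) st) (0, PySem.Dict.empty)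
  let st2 := (List.range cols).foldl
    (fun st c => aLine min_len max_len rows ((List.range rows).map (fun r => (g.getD r []).getD c ' ')) st) st1
  (st2.1, st2.2.items)

-- ===== PORT B =====
-- `for seg in line.split('#'): ...` body
def bSeg (min_len max_len : Int) (st : Int × PySem.Dict Int Int) (seg : List Char) : Int × PySem.Dict Int Int :=
  let l : Int := (seg.length : Int)
  if l ≠ 0 ∧ min_len ≤ l ∧ l ≤ max_len then
    (st.1 + 1, st.2.insert l (st.2.getD l 0 + 1))
  else st

def count_slots_alt (grid : List String) (min_len : Int) (max_len : Int) : Int × (List (Int × Int)) :=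
  let g := grid.map String.toList
  let cols := (g.headD []).length          -- len(grid[0])
  let lines := g.map (fun row => row.take cols)             -- row[:cols]
    ++ (List.range cols).map (fun c => g.map (fun row => row.getD c ' '))  -- ''.join(row[c] for row in grid)
  let st := lines.foldl
    (fun st line => (PySem.Chars.splitOn line ['#']).foldl (bSeg min_len max_len) st)
    (0, PySem.Dict.empty)
  (st.1, st.2.items)

-- ===== PRECONDITION & SPEC =====
-- Pre_: grid nonempty (A indexes grid[0]); every row at least cols = len(grid[0]) characters
-- long (A indexes grid[r][c] for c < cols, IndexError otherwise); and the first cols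
-- characters of every row are '.' or '#' (on any other character A's while-loops never
-- advance and the Python diverges).
def Pre_count_slots (grid : List String) (min_len : Int) (max_len : Int) : Prop :=
  grid ≠ [] ∧ grid.all (fun s =>
    decide ((grid.headD "").toList.length ≤ s.toList.length) &&
    (s.toList.take (grid.headD "").toList.length).all (fun ch => ch == '.' || ch == '#')) = true
instance (grid : List String) (min_len : Int) (max_len : Int) : Decidable (Pre_count_slots grid min_len max_len) := by unfold Pre_count_slots; infer_instance

def pvWitness_count_slots : List String × Int × Int := (["."], 1, 1)

def Spec_count_slots (grid : List String) (min_len : Int) (max_len : Int) (out : Int × (List (Int × Int))) : Prop := out = count_slots_alt grid min_len max_len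
instance (grid : List String) (min_len : Int) (max_len : Int) (out : Int × (List (Int × Int))) : Decidable (Spec_count_slots grid min_len max_len out) := by unfold Spec_count_slots; infer_instance

-- ===== CLAIM (what is proved, stated in full; the proofs are below) =====
def Claim_equal_count_slots : Prop := ∀ (grid : List String) (min_len : Int) (max_len : Int), Dom_count_slots grid min_len max_len → Pre_count_slots grid min_len max_len → Spec_count_slots grid min_len max_len (count_slots grid min_len max_len)

-- ===== LEMMAS AND PROOFS =====

-- reference splitter: what Python's split('#') produces on a char list
def pvSegs : List Char → List (List Char)
  | [] => [[]]
  | c :: t =>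
    match pvSegs t with
    | [] => []
    | s :: ss => if c = '#' then [] :: s :: ss else (c :: s) :: ss

theorem pvSegs_ne_nil (l : List Char) : pvSegs l ≠ [] := by
  induction l with
  | nil => simp [pvSegs]
  | cons c t ih =>
    cases h : pvSegs t with
    | nil => exact absurd h ih
    | cons s ss =>
      simp only [pvSegs, h]
      split <;> simp

theorem pvSegs_hash (t : List Char) : pvSegs ('#' :: t) = [] :: pvSegs t := by
  cases h : pvSegs t with
  | nil => exact absurd h (pvSegs_ne_nil t)
  | cons s ss => simp [pvSegs, h]

theorem pvSegs_cons_of_ne (c : Char) (t : List Char) (hc : c ≠ '#') :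
    pvSegs (c :: t) = (c :: (pvSegs t).headI) :: (pvSegs t).tail := by
  cases h : pvSegs t with
  | nil => exact absurd h (pvSegs_ne_nil t)
  | cons s ss => simp [pvSegs, h, hc]

theorem pvSegs_headI_tail (l : List Char) : (pvSegs l).headI :: (pvSegs l).tail = pvSegs l := by
  cases h : pvSegs l with
  | nil => exact absurd h (pvSegs_ne_nil l)
  | cons s ss => simp

theorem pvSplitOn_go_spec (fuel : Nat) : ∀ (l cur : List Char) (acc : List (List Char)),
    l.length < fuel →
    PySem.Chars.splitOn.go ['#'] fuel l cur acc
      = acc.reverse ++ (cur.reverse ++ (pvSegs l).headI) :: (pvSegs l).tail := by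
  induction fuel with
  | zero => intro l cur acc h; omega
  | succ fuel ih =>
    intro l cur acc h
    cases l with
    | nil => simp [PySem.Chars.splitOn.go, pvSegs]
    | cons c t =>
      by_cases hc : c = '#'
      · subst hc
        have hpre : List.isPrefixOf ['#'] ('#' :: t) = true := by simp [List.isPrefixOf]
        rw [show PySem.Chars.splitOn.go ['#'] (fuel + 1) ('#' :: t) cur acc
              = PySem.Chars.splitOn.go ['#'] fuel (List.drop (List.length ['#']) ('#' :: t)) []
                  (cur.reverse :: acc) by simp [PySem.Chars.splitOn.go, hpre]]
        simp only [List.length_cons, List.length_nil, List.drop_succ_cons, List.drop_zero]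
        rw [ih t [] (cur.reverse :: acc) (by simpa using Nat.lt_of_succ_lt_succ h)]
        rw [pvSegs_hash]
        simp [pvSegs_headI_tail]
      · have hpre : List.isPrefixOf ['#'] (c :: t) = false := by
          simp [List.isPrefixOf]; exact fun hcc => absurd hcc.symm hc
        rw [show PySem.Chars.splitOn.go ['#'] (fuel + 1) (c :: t) cur acc
              = PySem.Chars.splitOn.go ['#'] fuel t (c :: cur) acc by
            simp [PySem.Chars.splitOn.go, hpre]]
        rw [ih t (c :: cur) acc (by simpa using Nat.lt_of_succ_lt_succ h)]
        rw [pvSegs_cons_of_ne c t hc]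
        simp

theorem pvSplitOn_eq_segs (l : List Char) :
    PySem.Chars.splitOn l ['#'] = pvSegs l := by
  rw [show PySem.Chars.splitOn l ['#'] = PySem.Chars.splitOn.go ['#'] (l.length + 1) l [] [] from rfl]
  rw [pvSplitOn_go_spec (l.length + 1) l [] [] (Nat.lt_succ_self _)]
  simp [pvSegs_headI_tail]

theorem pvAScan_eq (cs : List Char) :
    aScan cs = ((cs.takeWhile (· = '.')).length, cs.dropWhile (· = '.')) := by
  induction cs with
  | nil => simp [aScan]
  | cons c t ih =>
    by_cases hc : c = '.'
    · subst hc; simp [aScan, ih]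
    · simp [aScan, hc]

theorem pvSegs_dots (dots rest : List Char) (h : ∀ c ∈ dots, c ≠ '#') :
    pvSegs (dots ++ rest) = (dots ++ (pvSegs rest).headI) :: (pvSegs rest).tail := by
  induction dots with
  | nil => simp [pvSegs_headI_tail]
  | cons d ds ih =>
    have hd : d ≠ '#' := h d (by simp)
    have ih' := ih (fun c hc => h c (by simp [hc]))
    rw [List.cons_append, pvSegs_cons_of_ne d (ds ++ rest) hd, ih']
    simp

-- head of a dropWhile result falsifies the predicate
theorem pvDropWhile_head (p : Char → Bool) (l : List Char) (a : Char) (t : List Char)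
    (h : l.dropWhile p = a :: t) : p a = false := by
  induction l with
  | nil => simp at h
  | cons c cs ih =>
    rw [List.dropWhile_cons] at h
    by_cases hp : p c
    · simp [hp] at h; exact ih h
    · simp [hp] at h; rw [← h.1]; simpa using hp

theorem pvLine_lemma (min_len max_len : Int) (fuel : Nat) :
    ∀ cs : List Char, cs.length ≤ fuel → (∀ ch ∈ cs, ch = '.' ∨ ch = '#') →
    ∀ st, aLine min_len max_len fuel cs st = (pvSegs cs).foldl (bSeg min_len max_len) st := by
  induction fuel with
  | zero =>
    intro cs h _ st
    have : cs = [] := List.eq_nil_of_length_eq_zero (Nat.le_zero.mp h)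
    subst this
    simp [aLine, pvSegs, bSeg]
  | succ fuel ih =>
    intro cs h hall st
    cases cs with
    | nil => simp [aLine, pvSegs, bSeg]
    | cons c rest =>
      by_cases hc : c = '#'
      · subst hc
        rw [show aLine min_len max_len (fuel + 1) ('#' :: rest) st
              = aLine min_len max_len fuel rest st by simp [aLine]]
        rw [ih rest (by simpa using Nat.le_of_succ_le_succ h)
              (fun ch hch => hall ch (by simp [hch])) st]
        rw [pvSegs_hash]
        simp [bSeg]
      · have hdot : c = '.' := (hall c (by simp)).resolve_right hc
        subst hdot
        have hscan := pvAScan_eq ('.' :: rest)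
        generalize hdots : ('.' :: rest).takeWhile (· = '.') = dots at hscan
        generalize hrest' : ('.' :: rest).dropWhile (· = '.') = rest' at hscan
        have hsplit : dots ++ rest' = '.' :: rest := by
          rw [← hdots, ← hrest']; exact List.takeWhile_append_dropWhile
        have hdotspos : 0 < dots.length := by
          rw [← hdots]; simp
        have hdotsnil : dots ≠ [] := List.ne_nil_of_length_pos hdotspos
        have hdotsall : ∀ x ∈ dots, x ≠ '#' := by
          intro x hx
          have := List.mem_takeWhile_imp (hdots ▸ hx)
          simp at this; simp [this]
        -- pvSegs rest' starts with []
        have hsegsrest : pvSegs rest' = [] :: (pvSegs rest').tail := by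
          cases hr : rest' with
          | nil => simp [pvSegs]
          | cons a t =>
            have ha : (fun x => decide (x = '.')) a = false :=
              pvDropWhile_head _ _ a t (hrest'.symm ▸ hr)
            have ha' : a ≠ '.' := by simpa using ha
            have hamem : a ∈ '.' :: rest := by
              rw [← hsplit, hr]; exact List.mem_append_right _ (by simp)
            have ha2 : a = '#' := (hall a hamem).resolve_left ha'
            subst ha2
            rw [pvSegs_hash]
            rfl
        have hsegs : pvSegs ('.' :: rest) = dots :: (pvSegs rest').tail := by
          rw [← hsplit, pvSegs_dots dots rest' hdotsall]
          rw [show (pvSegs rest').headI = [] by rw [hsegsrest]; rfl]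
          simp
        have hlen : rest'.length ≤ fuel := by
          have h1 : dots.length + rest'.length = rest.length + 1 := by
            have := congrArg List.length hsplit
            simpa using this
          simp at h
          omega
        have hall' : ∀ ch ∈ rest', ch = '.' ∨ ch = '#' := by
          intro ch hch
          exact hall ch (by rw [← hsplit]; exact List.mem_append_right _ hch)
        rw [show aLine min_len max_len (fuel + 1) ('.' :: rest) st
              = (if min_len ≤ ((aScan ('.' :: rest)).1 : Int) ∧ ((aScan ('.' :: rest)).1 : Int) ≤ max_len
                 then aLine min_len max_len fuel (aScan ('.' :: rest)).2
                        (st.1 + 1, st.2.insert ((aScan ('.' :: rest)).1 : Int)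
                          (st.2.getD ((aScan ('.' :: rest)).1 : Int) 0 + 1))
                 else aLine min_len max_len fuel (aScan ('.' :: rest)).2 st) by
            simp [aLine]]
        rw [hscan]
        simp only []
        rw [hsegs, List.foldl_cons]
        have hbseg : bSeg min_len max_len st dots
            = (if min_len ≤ (dots.length : Int) ∧ (dots.length : Int) ≤ max_len
               then (st.1 + 1, st.2.insert (dots.length : Int) (st.2.getD (dots.length : Int) 0 + 1))
               else st) := by
          simp [bSeg, hdotsnil]
        rw [hbseg]
        have htail : ∀ s, (pvSegs rest').tail.foldl (bSeg min_len max_len) s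
            = (pvSegs rest').foldl (bSeg min_len max_len) s := by
          intro s
          conv_rhs => rw [hsegsrest]
          rw [List.foldl_cons]
          simp [bSeg]
        split
        · rw [ih rest' hlen hall' _, htail]
        · rw [ih rest' hlen hall' st, htail]

theorem pvMapRangeGetD {α : Type} (xs : List α) (d : α) :
    (List.range xs.length).map (fun i => xs.getD i d) = xs := by
  apply List.ext_getElem
  · simp
  · intro i h1 h2
    simp [List.getD_eq_getElem?_getD, List.getElem?_eq_getElem h2]

theorem pvLinePass {α : Type} (f : α → List Char) (g : List α) (min_len max_len : Int) (n : Nat)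
    (hlen : ∀ x ∈ g, (f x).length ≤ n)
    (hall : ∀ x ∈ g, ∀ ch ∈ f x, ch = '.' ∨ ch = '#') :
    ∀ st, g.foldl (fun st x => aLine min_len max_len n (f x) st) st
      = (g.map f).foldl (fun st line =>
          (PySem.Chars.splitOn line ['#']).foldl (bSeg min_len max_len) st) st := by
  induction g with
  | nil => intro st; simp
  | cons x xs ih =>
    intro st
    simp only [List.foldl_cons, List.map_cons]
    rw [pvLine_lemma min_len max_len n (f x) (hlen x (by simp)) (hall x (by simp)) st]
    rw [ih (fun y hy => hlen y (by simp [hy])) (fun y hy => hall y (by simp [hy]))]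
    rw [pvSplitOn_eq_segs]

-- ===== VERDICT (by name: the statement is the Claim_ definition above) =====
theorem count_slots_spec : Claim_equal_count_slots := by
  intro grid min_len max_len _ hpre
  obtain ⟨hne, hrowsb⟩ := hpre
  have hrows : ∀ s ∈ grid, (grid.headD "").toList.length ≤ s.toList.length ∧
      ∀ ch ∈ s.toList.take (grid.headD "").toList.length, ch = '.' ∨ ch = '#' := by
    intro s hs
    have h1 := List.all_eq_true.mp hrowsb s hs
    simp only [Bool.and_eq_true, decide_eq_true_eq, List.all_eq_true, Bool.or_eq_true,
      beq_iff_eq] at h1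
    exact ⟨h1.1, h1.2⟩
  cases grid with
  | nil => exact absurd rfl hne
  | cons s0 grest =>
  unfold Spec_count_slots count_slots count_slots_alt
  simp only []
  generalize hg : List.map String.toList (s0 :: grest) = g
  have hcols' : ((s0 :: grest).headD "").toList.length = (g.headD []).length := by
    rw [← hg]; simp
  generalize hcols : (g.headD []).length = cols at hcols'
  have hrowlen : ∀ row ∈ g, cols ≤ row.length := by
    intro row hrow
    rw [← hg] at hrow
    obtain ⟨s, hs, rfl⟩ := List.mem_map.mp hrow
    rw [← hcols']
    exact (hrows s hs).1
  have hrowchars : ∀ row ∈ g, ∀ ch ∈ row.take cols, ch = '.' ∨ ch = '#' := by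
    intro row hrow ch hch
    rw [← hg] at hrow
    obtain ⟨s, hs, rfl⟩ := List.mem_map.mp hrow
    exact (hrows s hs).2 ch (by rw [hcols']; exact hch)
  -- first pass
  have hmap1 : (List.range g.length).map (fun r => (g.getD r []).take cols)
      = g.map (fun row => row.take cols) := by
    conv_rhs => rw [← pvMapRangeGetD g []]
    rw [List.map_map]
    rfl
  have hpass1 : ∀ st, (List.range g.length).foldl
      (fun st r => aLine min_len max_len cols ((g.getD r []).take cols) st) st
      = (g.map (fun row => row.take cols)).foldl (fun st line =>
          (PySem.Chars.splitOn line ['#']).foldl (bSeg min_len max_len) st) st := by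
    intro st
    rw [pvLinePass (fun r => (g.getD r []).take cols) (List.range g.length) min_len max_len cols
          (fun x _ => by simp)
          (fun r hr ch hch => by
            have hrlt : r < g.length := List.mem_range.mp hr
            have hrow : g.getD r [] ∈ g := by
              rw [List.getD_eq_getElem _ _ hrlt]; exact List.getElem_mem _
            exact hrowchars _ hrow ch hch) st]
    rw [hmap1]
  -- second pass
  have hmap2 : ∀ c : Nat, (List.range g.length).map (fun r => (g.getD r []).getD c ' ')
      = g.map (fun row => row.getD c ' ') := by
    intro c
    conv_rhs => rw [← pvMapRangeGetD g []]
    rw [List.map_map]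
    rfl
  have hpass2 : ∀ st, (List.range cols).foldl
      (fun st c => aLine min_len max_len g.length
        ((List.range g.length).map (fun r => (g.getD r []).getD c ' ')) st) st
      = ((List.range cols).map (fun c => g.map (fun row => row.getD c ' '))).foldl
          (fun st line => (PySem.Chars.splitOn line ['#']).foldl (bSeg min_len max_len) st) st := by
    intro st
    rw [pvLinePass (fun c => (List.range g.length).map (fun r => (g.getD r []).getD c ' '))
          (List.range cols) min_len max_len g.length
          (fun c _ => by simp)
          (fun c hc ch hch => by
            have hclt : c < cols := List.mem_range.mp hc
            obtain ⟨r, hr, rfl⟩ := List.mem_map.mp hch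
            have hrlt : r < g.length := List.mem_range.mp hr
            have hrowe : g.getD r [] = g[r] := List.getD_eq_getElem _ _ hrlt
            rw [hrowe]
            have hrow : g[r] ∈ g := List.getElem_mem _
            have hle := hrowlen _ hrow
            rw [List.getD_eq_getElem _ ' ' (by omega)]
            apply hrowchars _ hrow
            rw [show (g[r])[c]'(by omega) = ((g[r]).take cols)[c]'(by simp; omega)
                  from (List.getElem_take).symm]
            exact List.getElem_mem _) st]
    congr 1
    exact List.map_congr_left (fun c _ => hmap2 c)
  rw [hpass1, hpass2, List.foldl_append]
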